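-- pv_equiv track=rewrite | github.com/nopal-fz/Sentiment-Shadow-Deployment | utils/labelling.py | determine_sentiment
-- ===== SOURCE A (Python) =====
-- def determine_sentiment(text, positive_lexicon, negative_lexicon):
--     if isinstance(text, str):
--         positive_count = sum(1 for word in text.split() if word in positive_lexicon)
--         negative_count = sum(1 for word in text.split() if word in negative_lexicon)
--         sentiment_score = positive_count - negative_count
--         if sentiment_score > 0:
--             sentiment = 'Positif'
--         elif sentiment_score < 0:
--             sentiment = 'Negatif'
--         else:
--             sentiment = 'Netral'
--         return sentiment_score, sentiment
--     return 0, 'Netral'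
-- ===== SOURCE B (Python) =====
-- from collections import Counter
--
--
-- def determine_sentiment(text, positive_lexicon, negative_lexicon):
--     if not isinstance(text, str):
--         return 0, 'Netral'
--     pos = set(positive_lexicon)
--     neg = set(negative_lexicon)
--     positive_count = 0
--     negative_count = 0
--     for word, count in Counter(text.split()).items():
--         if word in pos:
--             positive_count += count
--         if word in neg:
--             negative_count += count
--     score = positive_count - negative_count
--     label = 'Positif' if score > 0 else 'Negatif' if score < 0 else 'Netral'
--     return score, label
-- ===== Notes on version B (the rewrite author's own statement) =====
-- stated objective: alternative
-- what changed: Builds a word-frequency Counter and membership sets once, then a single pass over the unique words sums hit counts for both lexicons, instead of two raw scans of the split word list each doing a list-membership test per word.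
import Mathlib
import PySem

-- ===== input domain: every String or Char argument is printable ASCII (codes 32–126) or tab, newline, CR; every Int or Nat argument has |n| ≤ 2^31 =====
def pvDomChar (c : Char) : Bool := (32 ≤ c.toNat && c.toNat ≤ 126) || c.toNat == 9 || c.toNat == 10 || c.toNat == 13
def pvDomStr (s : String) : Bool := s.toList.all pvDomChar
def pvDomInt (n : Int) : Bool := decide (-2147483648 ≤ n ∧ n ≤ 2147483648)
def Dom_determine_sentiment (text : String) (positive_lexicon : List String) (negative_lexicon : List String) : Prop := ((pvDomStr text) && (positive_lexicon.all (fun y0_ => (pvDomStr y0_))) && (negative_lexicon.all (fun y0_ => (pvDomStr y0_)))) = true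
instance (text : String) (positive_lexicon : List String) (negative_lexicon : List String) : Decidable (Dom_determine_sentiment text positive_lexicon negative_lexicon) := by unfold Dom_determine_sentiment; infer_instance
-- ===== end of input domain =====

-- B replaces A's two raw scans of the split words (each with a linear lexicon membership test)
-- by a Counter over the words plus set lookups, summing counts over the unique words in a single pass (objective: alternative decomposition).

-- ===== PORT A =====
-- text : String, so the isinstance(text, str) guard is always true and its branch is the whole port.
def determine_sentiment (text : String) (positive_lexicon : List String) (negative_lexicon : List String) : Int × String :=
  let words := PySem.Str.split₀ text
  let positive_count : Int := words.foldl (fun a w => if positive_lexicon.contains w then a + 1 else a) 0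
  let negative_count : Int := words.foldl (fun a w => if negative_lexicon.contains w then a + 1 else a) 0
  let sentiment_score := positive_count - negative_count
  let sentiment := if sentiment_score > 0 then "Positif"
    else if sentiment_score < 0 then "Negatif" else "Netral"
  (sentiment_score, sentiment)

-- ===== PORT B =====
def determine_sentiment_alt (text : String) (positive_lexicon : List String) (negative_lexicon : List String) : Int × String :=
  let pos := PySem.Set.ofList positive_lexicon
  let neg := PySem.Set.ofList negative_lexicon
  let counts := (PySem.Dict.counter (PySem.Str.split₀ text)).items.foldl
    (fun (acc : Int × Int) kv =>
      (if PySem.Set.contains pos kv.1 then acc.1 + kv.2 else acc.1,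
       if PySem.Set.contains neg kv.1 then acc.2 + kv.2 else acc.2)) (0, 0)
  let score := counts.1 - counts.2
  let label := if score > 0 then "Positif" else if score < 0 then "Negatif" else "Netral"
  (score, label)

-- ===== PRECONDITION & SPEC =====
def Spec_determine_sentiment (text : String) (positive_lexicon : List String) (negative_lexicon : List String) (out : Int × String) : Prop := out = determine_sentiment_alt text positive_lexicon negative_lexicon
instance (text : String) (positive_lexicon : List String) (negative_lexicon : List String) (out : Int × String) : Decidable (Spec_determine_sentiment text positive_lexicon negative_lexicon out) := by unfold Spec_determine_sentiment; infer_instance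

-- ===== CLAIM (what is proved, stated in full; the proofs are below) =====
def Claim_equal_determine_sentiment : Prop := ∀ (text : String) (positive_lexicon : List String) (negative_lexicon : List String), Dom_determine_sentiment text positive_lexicon negative_lexicon → Spec_determine_sentiment text positive_lexicon negative_lexicon (determine_sentiment text positive_lexicon negative_lexicon)

-- ===== LEMMAS AND PROOFS =====

-- A's scan of the word list counts the words satisfying p.
theorem foldl_count_eq (ws : List String) (p : String → Bool) (a : Int) :
    ws.foldl (fun a w => if p w then a + 1 else a) a = a + (ws.countP p : Int) := by
  induction ws generalizing a with
  | nil => simp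
  | cons w ws ih =>
    by_cases h : p w <;> simp only [List.foldl, h, ih, List.countP_cons, if_true, if_false,
      Bool.false_eq_true, Nat.cast_add, Nat.cast_one] <;> ring

-- B's single pair-accumulating pass splits into two independent sums.
theorem foldl_pair_eq (l : List (String × Int)) (p q : String → Bool) (a b : Int) :
    l.foldl (fun (acc : Int × Int) kv =>
      (if p kv.1 then acc.1 + kv.2 else acc.1,
       if q kv.1 then acc.2 + kv.2 else acc.2)) (a, b)
    = (a + (l.map (fun kv => if p kv.1 then kv.2 else 0)).sum,
       b + (l.map (fun kv => if q kv.1 then kv.2 else 0)).sum) := by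
  induction l generalizing a b with
  | nil => simp
  | cons kv l ih =>
    simp only [List.foldl, List.map, List.sum_cons, ih]
    by_cases hp : p kv.1 <;> by_cases hq : q kv.1 <;> simp [hp, hq, add_assoc]

-- Summing each unique word's multiplicity over the words that hit the lexicon
-- equals counting the hits along the raw word list.
theorem sum_counter_eq_countP (ws : List String) (p : String → Bool) :
    ((PySem.Set.ofList ws).map (fun k => if p k then (ws.count k : Int) else 0)).sum
      = (ws.countP p : Int) := by
  have hperm : List.Perm (PySem.Set.ofList ws) ws.dedup := by
    refine (List.perm_ext_iff_of_nodup (PySem.Set.nodup_ofList ws) ws.nodup_dedup).2 ?_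
    intro x; simp [PySem.Set.mem_ofList, List.mem_dedup]
  rw [List.Perm.sum_eq (hperm.map _)]
  have key := List.sum_map_count_dedup_filter_eq_countP p ws
  have : (ws.dedup.map (fun k => if p k then (ws.count k : Int) else 0)).sum
      = (((ws.dedup.filter p).map fun x => ws.count x).sum : Int) := by
    induction ws.dedup with
    | nil => simp
    | cons k d ih =>
      by_cases h : p k <;> simp [h, ih]
  rw [this, key]

theorem determine_sentiment_eq (text : String) (positive_lexicon : List String)
    (negative_lexicon : List String) :
    determine_sentiment text positive_lexicon negative_lexicon
      = determine_sentiment_alt text positive_lexicon negative_lexicon := by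
  unfold determine_sentiment determine_sentiment_alt
  simp only [PySem.Dict.items_counter, foldl_pair_eq, foldl_count_eq, zero_add,
    List.map_map]
  have hmap : ∀ (lex : List String),
      ((PySem.Set.ofList (PySem.Str.split₀ text)).map
        ((fun kv : String × Int => if PySem.Set.contains (PySem.Set.ofList lex) kv.1 then kv.2 else 0)
          ∘ fun k => (k, ((PySem.Str.split₀ text).count k : Int)))).sum
      = ((PySem.Str.split₀ text).countP (fun w => lex.contains w) : Int) := by
    intro lex
    rw [← sum_counter_eq_countP (PySem.Str.split₀ text) (fun w => lex.contains w)]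
    congr 1
    apply List.map_congr_left
    intro k _
    simp [Function.comp, PySem.Set.contains_eq_listContains, PySem.Set.mem_ofList]
  rw [hmap, hmap]

-- ===== VERDICT (by name: the statement is the Claim_ definition above) =====
theorem determine_sentiment_spec : Claim_equal_determine_sentiment := by
  intro text pos neg _
  unfold Spec_determine_sentiment
  exact determine_sentiment_eq text pos neg
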